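-- pv_equiv track=rewrite | github.com/HeoSeokYong/AlgorithmStudy | Dynamic_Programming/num_road.py | solution
-- ===== SOURCE A (Python) =====
-- from typing import List, Tuple, Callable
--
-- def solution(N:int, M:int, construction:List) -> int:
--     dp = [[0 for _ in range(M+1)] for _ in range(N+1)]
--
--     for i in range(N+1):
--         for j in range(M+1):
--             if i == 0 and j == 0:
--                 dp[i][j] = 1
--             else:
--                 if i > 0 and construction[i-1][j][0]:
--                     dp[i][j] += dp[i-1][j]
--
--                 if j > 0 and construction[i][j-1][1]:
--                     dp[i][j] += dp[i][j-1]
--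
--     return dp[N][M]
-- ===== SOURCE B (Python) =====
-- def solution(N, M, construction):
--     # Top-down memoized recursion: count(i, j) = number of allowed paths
--     # from (0, 0) to (i, j); only cells reachable backwards from (N, M)
--     # are ever visited.
--     memo = {}
--
--     def count(i, j):
--         if i == 0 and j == 0:
--             return 1
--         if (i, j) in memo:
--             return memo[(i, j)]
--         total = 0
--         if i > 0 and construction[i - 1][j][0]:
--             total += count(i - 1, j)
--         if j > 0 and construction[i][j - 1][1]:
--             total += count(i, j - 1)
--         memo[(i, j)] = total
--         return total
--
--     return count(N, M)
-- ===== Notes on version B (the rewrite author's own statement) =====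
-- stated objective: alternative
-- what changed: B replaces A's bottom-up row-major full-table DP with top-down memoized recursion from (N,M), an iterative-to-recursive switch of the same recurrence that only visits cells reachable backwards from the goal.
import Mathlib
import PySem

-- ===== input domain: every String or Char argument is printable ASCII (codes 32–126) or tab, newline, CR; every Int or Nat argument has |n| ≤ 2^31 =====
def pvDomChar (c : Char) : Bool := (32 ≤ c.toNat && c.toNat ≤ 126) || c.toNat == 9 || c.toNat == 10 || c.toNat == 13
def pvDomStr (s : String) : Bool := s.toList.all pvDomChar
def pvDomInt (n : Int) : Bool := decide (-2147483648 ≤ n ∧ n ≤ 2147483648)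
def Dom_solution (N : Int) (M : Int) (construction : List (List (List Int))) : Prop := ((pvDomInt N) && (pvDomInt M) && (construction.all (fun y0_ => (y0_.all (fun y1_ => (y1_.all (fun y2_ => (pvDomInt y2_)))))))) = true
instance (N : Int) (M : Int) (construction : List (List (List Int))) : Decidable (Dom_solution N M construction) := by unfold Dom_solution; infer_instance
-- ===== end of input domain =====

-- B changes the decomposition only (top-down memoized recursion instead of A's
-- bottom-up full table); equivalence of the return value is proved on Pre_.

-- ===== PORT A =====
-- dp[a][b] (indices are nonnegative and in range whenever Python A returns,
-- so the `getD`-totalised reads are exact there; out of range Python raises,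
-- which Pre_solution excludes)
def pvGet2 (dp : List (List Int)) (a b : Int) : Int :=
  PySem.List.pyGetD (PySem.List.pyGetD dp a []) b 0

-- construction[a][b][c]
def pvGet3 (c : List (List (List Int))) (a b k : Int) : Int :=
  PySem.List.pyGetD (PySem.List.pyGetD (PySem.List.pyGetD c a []) b []) k 0

-- dp[a][b] = v
def pvSet2 (dp : List (List Int)) (a b v : Int) : List (List Int) :=
  PySem.List.pySetD dp a (PySem.List.pySetD (PySem.List.pyGetD dp a []) b v)

def solution (N : Int) (M : Int) (construction : List (List (List Int))) : Int :=
  let dp0 : List (List Int) :=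
    (PySem.List.pyRange 0 (N+1) 1).map
      (fun _ => (PySem.List.pyRange 0 (M+1) 1).map (fun _ => (0 : Int)))
  let dp :=
    (PySem.List.pyRange 0 (N+1) 1).foldl (fun dp i =>
      (PySem.List.pyRange 0 (M+1) 1).foldl (fun dp j =>
        if i = 0 ∧ j = 0 then pvSet2 dp i j 1
        else
          let dp1 := if 0 < i ∧ pvGet3 construction (i-1) j 0 ≠ 0 then
                       pvSet2 dp i j (pvGet2 dp i j + pvGet2 dp (i-1) j) else dp
          if 0 < j ∧ pvGet3 construction i (j-1) 1 ≠ 0 then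
            pvSet2 dp1 i j (pvGet2 dp1 i j + pvGet2 dp1 i (j-1)) else dp1) dp) dp0
  pvGet2 dp N M

-- ===== PORT B =====
-- `count(i, j)` of Source B; the Python memo dict is a pure cache and does not
-- change any returned value, so the port is the recursion itself.
def altCount (construction : List (List (List Int))) (i j : Int) : Int :=
  if i = 0 ∧ j = 0 then 1
  else
    (if 0 < i ∧ pvGet3 construction (i-1) j 0 ≠ 0 then altCount construction (i-1) j else 0)
    + (if 0 < j ∧ pvGet3 construction i (j-1) 1 ≠ 0 then altCount construction i (j-1) else 0)
termination_by (i.toNat + j.toNat)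
decreasing_by all_goals omega

def solution_alt (N : Int) (M : Int) (construction : List (List (List Int))) : Int :=
  altCount construction N M

-- ===== PRECONDITION & SPEC =====
-- Exactly the inputs on which Python A returns: N, M ≥ 0 and every cell the
-- loop actually indexes exists — construction[i-1][j][0] for 1 ≤ i ≤ N,
-- 0 ≤ j ≤ M, and construction[i][j-1][1] for 0 ≤ i ≤ N, 1 ≤ j ≤ M.
def Pre_solution (N : Int) (M : Int) (construction : List (List (List Int))) : Prop :=
  0 ≤ N ∧ 0 ≤ M ∧
  (1 ≤ N → N ≤ (construction.length : Int) ∧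
    ∀ row ∈ construction.take N.toNat, (M+1) ≤ (row.length : Int) ∧
      ∀ cell ∈ row.take (M+1).toNat, 1 ≤ (cell.length : Int)) ∧
  (1 ≤ M → N+1 ≤ (construction.length : Int) ∧
    ∀ row ∈ construction.take (N+1).toNat, M ≤ (row.length : Int) ∧
      ∀ cell ∈ row.take M.toNat, 2 ≤ (cell.length : Int))
instance (N : Int) (M : Int) (construction : List (List (List Int))) : Decidable (Pre_solution N M construction) := by unfold Pre_solution; infer_instance

def pvWitness_solution : Int × Int × List (List (List Int)) :=
  (1, 1, [[[1, 1], [1, 1]], [[1, 1], [1, 1]]])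

def Spec_solution (N : Int) (M : Int) (construction : List (List (List Int))) (out : Int) : Prop := out = solution_alt N M construction
instance (N : Int) (M : Int) (construction : List (List (List Int))) (out : Int) : Decidable (Spec_solution N M construction out) := by unfold Spec_solution; infer_instance

-- ===== CLAIM (what is proved, stated in full; the proofs are below) =====
def Claim_equal_solution : Prop := ∀ (N : Int) (M : Int) (construction : List (List (List Int))), Dom_solution N M construction → Pre_solution N M construction → Spec_solution N M construction (solution N M construction)

-- ===== LEMMAS AND PROOFS =====

-- generic invariant preservation along `for k in range(a, b)`
theorem foldl_pyRange_inv {α : Type} (P : Int → α → Prop) (g : α → Int → α)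
    (a b : Int) (hab : a ≤ b)
    (h : ∀ k x, a ≤ k → k < b → P k x → P (k+1) (g x k)) :
    ∀ x, P a x → P b ((PySem.List.pyRange a b 1).foldl g x) := by
  obtain ⟨n, hn⟩ : ∃ n : Nat, b = a + n := ⟨(b - a).toNat, by omega⟩
  subst hn
  clear hab
  induction n generalizing a with
  | zero =>
      intro x hx
      simpa [PySem.List.pyRange_one_eq_nil] using hx
  | succ m ih =>
      intro x hx
      rw [PySem.List.pyRange_one_cons (by omega)]
      simp only [List.foldl_cons]
      have hstep : ∀ k y, a + 1 ≤ k → k < (a + 1) + (m : Int) → P k y → P (k+1) (g y k) := by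
        intro k y hk1 hk2 hy
        exact h k y (by omega) (by push_cast; omega) hy
      have harith : a + ((m : Nat) + 1 : Nat) = (a + 1) + (m : Int) := by push_cast; ring
      rw [harith]
      exact ih (a + 1) hstep (g x a) (h a x le_rfl (by push_cast; omega) hx)

-- the invariant: dp has full (N+1)x(M+1) shape, cells processed before (i, j)
-- in row-major order hold the recurrence value, the rest are still 0
def InvDP (c : List (List (List Int))) (N M i j : Int) (dp : List (List Int)) : Prop :=
  ((dp.length : Int) = N + 1) ∧ (∀ row ∈ dp, (row.length : Int) = M + 1) ∧
  ∀ a b : Int, 0 ≤ a → a ≤ N → 0 ≤ b → b ≤ M →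
    pvGet2 dp a b = if a < i ∨ (a = i ∧ b < j) then altCount c a b else 0

theorem pvGet2_pvSet2 (dp : List (List Int)) (i j a b v : Int)
    (hi0 : 0 ≤ i) (hi : i < (dp.length : Int))
    (hj0 : 0 ≤ j) (hj : j < ((PySem.List.pyGetD dp i []).length : Int))
    (ha0 : 0 ≤ a) (hb0 : 0 ≤ b) :
    pvGet2 (pvSet2 dp i j v) a b = if a = i ∧ b = j then v else pvGet2 dp a b := by
  have hi' : i = ((i.toNat : Nat) : Int) := by omega
  have hj' : j = ((j.toNat : Nat) : Int) := by omega
  have ha' : a = ((a.toNat : Nat) : Int) := by omega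
  have hb' : b = ((b.toNat : Nat) : Int) := by omega
  unfold pvGet2 pvSet2
  rw [hi', hj', ha', hb']
  rw [PySem.List.pyGetD_pySetD_natCast _ _ _ _ _ (by omega)]
  by_cases hai : a.toNat = i.toNat
  · rw [if_pos hai, hai]
    rw [PySem.List.pyGetD_pySetD_natCast _ _ _ _ _ (by rw [hi'] at hj; omega)]
    by_cases hbj : b.toNat = j.toNat
    · rw [if_pos hbj, if_pos ⟨by omega, by omega⟩]
    · rw [if_neg hbj, if_neg (by omega)]
  · rw [if_neg hai, if_neg (by omega)]

theorem shape_pvSet2 (N M : Int) (dp : List (List Int)) (i j v : Int)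
    (hi0 : 0 ≤ i) (hi : i < (dp.length : Int))
    (hlen : (dp.length : Int) = N + 1) (hrows : ∀ row ∈ dp, (row.length : Int) = M + 1) :
    ((pvSet2 dp i j v).length : Int) = N + 1 ∧
      ∀ row ∈ pvSet2 dp i j v, (row.length : Int) = M + 1 := by
  have hmem : PySem.List.pyGetD dp i [] ∈ dp :=
    PySem.List.pyGetD_mem dp [] ⟨by omega, by omega⟩
  constructor
  · rw [pvSet2, PySem.List.length_pySetD]; exact hlen
  · intro row hr
    rw [pvSet2, PySem.List.pySetD_of_nonneg _ _ hi0] at hr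
    rcases List.mem_or_eq_of_mem_set hr with h | h
    · exact hrows _ h
    · subst h
      rw [PySem.List.length_pySetD]
      exact hrows _ hmem

theorem inv_step (c : List (List (List Int))) (N M i j : Int) (dp : List (List Int))
    (hi0 : 0 ≤ i) (hiN : i ≤ N) (hj0 : 0 ≤ j) (hjM : j ≤ M)
    (h : InvDP c N M i j dp) :
    InvDP c N M i (j+1)
      (if i = 0 ∧ j = 0 then pvSet2 dp i j 1
       else
         let dp1 := if 0 < i ∧ pvGet3 c (i-1) j 0 ≠ 0 then
                      pvSet2 dp i j (pvGet2 dp i j + pvGet2 dp (i-1) j) else dp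
         if 0 < j ∧ pvGet3 c i (j-1) 1 ≠ 0 then
           pvSet2 dp1 i j (pvGet2 dp1 i j + pvGet2 dp1 i (j-1)) else dp1) := by
  obtain ⟨hlen, hrows, hget⟩ := h
  have hilen : i < (dp.length : Int) := by omega
  have hrowlen : ((PySem.List.pyGetD dp i []).length : Int) = M + 1 :=
    hrows _ (PySem.List.pyGetD_mem dp [] ⟨by omega, by omega⟩)
  have hjlen : j < ((PySem.List.pyGetD dp i []).length : Int) := by omega
  by_cases h00 : i = 0 ∧ j = 0
  · rw [if_pos h00]
    obtain ⟨hsl, hsr⟩ := shape_pvSet2 N M dp i j 1 hi0 hilen hlen hrows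
    refine ⟨hsl, hsr, ?_⟩
    intro a b ha0 haN hb0 hbM
    rw [pvGet2_pvSet2 dp i j a b 1 hi0 hilen hj0 hjlen ha0 hb0]
    obtain ⟨hie, hje⟩ := h00
    subst hie; subst hje
    by_cases hab : a = 0 ∧ b = 0
    · rw [if_pos hab, if_pos (by omega)]
      obtain ⟨ha, hb⟩ := hab; subst ha; subst hb
      rw [altCount]; simp
    · rw [if_neg hab, hget a b ha0 haN hb0 hbM,
        if_neg (by omega), if_neg (by omega)]
  · rw [if_neg h00]
    -- value already stored at (i, j) is 0
    have hij0 : pvGet2 dp i j = 0 := by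
      rw [hget i j hi0 hiN hj0 hjM, if_neg (by omega)]
    -- first conditional update
    set cond1 := 0 < i ∧ pvGet3 c (i-1) j 0 ≠ 0 with hc1
    set cond2 := 0 < j ∧ pvGet3 c i (j-1) 1 ≠ 0 with hc2
    set t1 : Int := if cond1 then altCount c (i-1) j else 0 with ht1
    set t2 : Int := if cond2 then altCount c i (j-1) else 0 with ht2
    set dp1 := if cond1 then pvSet2 dp i j (pvGet2 dp i j + pvGet2 dp (i-1) j) else dp with hdp1
    have hdp1len : (dp1.length : Int) = N + 1 := by
      rw [hdp1]; split
      · exact (shape_pvSet2 N M dp i j _ hi0 hilen hlen hrows).1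
      · exact hlen
    have hdp1rows : ∀ row ∈ dp1, (row.length : Int) = M + 1 := by
      rw [hdp1]; split
      · exact (shape_pvSet2 N M dp i j _ hi0 hilen hlen hrows).2
      · exact hrows
    have hdp1get : ∀ a b : Int, 0 ≤ a → 0 ≤ b →
        pvGet2 dp1 a b = if a = i ∧ b = j then t1 else pvGet2 dp a b := by
      intro a b ha0 hb0
      rw [hdp1, ht1]
      by_cases hc : cond1
      · rw [if_pos hc, if_pos hc,
          pvGet2_pvSet2 dp i j a b _ hi0 hilen hj0 hjlen ha0 hb0, hij0]
        have hgim : pvGet2 dp (i-1) j = altCount c (i-1) j := by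
          rw [hget (i-1) j (by omega) (by omega) hj0 hjM, if_pos (by omega)]
        rw [hgim]
        by_cases hab : a = i ∧ b = j
        · rw [if_pos hab, if_pos hab]; ring
        · rw [if_neg hab, if_neg hab]
      · rw [if_neg hc, if_neg hc]
        by_cases hab : a = i ∧ b = j
        · obtain ⟨ha, hb⟩ := hab; subst ha; subst hb
          rw [if_pos ⟨rfl, rfl⟩, hij0]
        · rw [if_neg hab]
    -- second conditional update
    have hi1len : i < (dp1.length : Int) := by omega
    have hrow1len : ((PySem.List.pyGetD dp1 i []).length : Int) = M + 1 :=
      hdp1rows _ (PySem.List.pyGetD_mem dp1 [] ⟨by omega, by omega⟩)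
    have hj1len : j < ((PySem.List.pyGetD dp1 i []).length : Int) := by omega
    refine ⟨?_, ?_, ?_⟩
    · split
      · exact (shape_pvSet2 N M dp1 i j _ hi0 hi1len hdp1len hdp1rows).1
      · exact hdp1len
    · split
      · exact (shape_pvSet2 N M dp1 i j _ hi0 hi1len hdp1len hdp1rows).2
      · exact hdp1rows
    · intro a b ha0 haN hb0 hbM
      have hfinal : pvGet2
          (if cond2 then pvSet2 dp1 i j (pvGet2 dp1 i j + pvGet2 dp1 i (j-1)) else dp1) a b
          = if a = i ∧ b = j then t1 + t2 else pvGet2 dp a b := by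
        by_cases hc : cond2
        · rw [if_pos hc,
            pvGet2_pvSet2 dp1 i j a b _ hi0 hi1len hj0 hj1len ha0 hb0]
          have hg1 : pvGet2 dp1 i j = t1 := by
            rw [hdp1get i j hi0 hj0, if_pos ⟨rfl, rfl⟩]
          have hg2 : pvGet2 dp1 i (j-1) = altCount c i (j-1) := by
            rw [hdp1get i (j-1) hi0 (by rw [hc2] at hc; omega),
              if_neg (by omega),
              hget i (j-1) hi0 hiN (by rw [hc2] at hc; omega) (by omega),
              if_pos (by omega)]
          rw [hg1, hg2, ht2, if_pos hc]
          by_cases hab : a = i ∧ b = j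
          · rw [if_pos hab, if_pos hab]
          · rw [if_neg hab, if_neg hab, hdp1get a b ha0 hb0, if_neg hab]
        · rw [if_neg hc, hdp1get a b ha0 hb0, ht2, if_neg hc]
          by_cases hab : a = i ∧ b = j
          · rw [if_pos hab, if_pos hab]; ring
          · rw [if_neg hab, if_neg hab]
      rw [hfinal]
      by_cases hab : a = i ∧ b = j
      · rw [if_pos hab, if_pos (by omega)]
        obtain ⟨ha, hb⟩ := hab; subst ha; subst hb
        rw [altCount, if_neg h00, ht1, ht2]
      · rw [if_neg hab, hget a b ha0 haN hb0 hbM]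
        by_cases hcnd : a < i ∨ (a = i ∧ b < j)
        · rw [if_pos hcnd, if_pos (by omega)]
        · rw [if_neg hcnd, if_neg (by omega)]

theorem inv_init (c : List (List (List Int))) (N M : Int) (hN : 0 ≤ N) (hM : 0 ≤ M) :
    InvDP c N M 0 0
      ((PySem.List.pyRange 0 (N+1) 1).map
        (fun _ => (PySem.List.pyRange 0 (M+1) 1).map (fun _ => (0 : Int)))) := by
  refine ⟨?_, ?_, ?_⟩
  · rw [List.length_map, PySem.List.length_pyRange_one]; omega
  · intro row hr
    rw [List.mem_map] at hr
    obtain ⟨k, _, hk⟩ := hr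
    rw [← hk, List.length_map, PySem.List.length_pyRange_one]; omega
  · intro a b ha0 haN hb0 hbM
    rw [if_neg (by omega)]
    unfold pvGet2
    rw [PySem.List.pyGetD_map_pyRange_of_nonneg _ _ _ _ ha0 (by omega),
      PySem.List.pyGetD_map_pyRange_of_nonneg _ _ _ _ hb0 (by omega)]

-- ===== VERDICT (by name: the statement is the Claim_ definition above) =====
theorem solution_spec : Claim_equal_solution := by
  intro N M construction _ hPre
  obtain ⟨hN, hM, -, -⟩ := hPre
  unfold Spec_solution solution solution_alt
  have hinner : ∀ i dp, 0 ≤ i → i < N + 1 → InvDP construction N M i 0 dp →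
      InvDP construction N M (i+1) 0
        ((PySem.List.pyRange 0 (M+1) 1).foldl (fun dp j =>
          if i = 0 ∧ j = 0 then pvSet2 dp i j 1
          else
            let dp1 := if 0 < i ∧ pvGet3 construction (i-1) j 0 ≠ 0 then
                         pvSet2 dp i j (pvGet2 dp i j + pvGet2 dp (i-1) j) else dp
            if 0 < j ∧ pvGet3 construction i (j-1) 1 ≠ 0 then
              pvSet2 dp1 i j (pvGet2 dp1 i j + pvGet2 dp1 i (j-1)) else dp1) dp) := by
    intro i dp hi0 hiN hdp
    have hfold := foldl_pyRange_inv (fun j dp => InvDP construction N M i j dp)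
      _ 0 (M+1) (by omega)
      (fun j dp hj0 hjM hdp => inv_step construction N M i j dp hi0 (by omega) hj0 (by omega) hdp)
      dp hdp
    obtain ⟨h1, h2, h3⟩ := hfold
    refine ⟨h1, h2, ?_⟩
    intro a b ha0 haN hb0 hbM
    rw [h3 a b ha0 haN hb0 hbM]
    by_cases hcnd : a < i + 1 ∨ (a = i + 1 ∧ b < 0)
    · rw [if_pos hcnd, if_pos (by omega)]
    · rw [if_neg hcnd, if_neg (by omega)]
  have hmain := foldl_pyRange_inv (fun i dp => InvDP construction N M i 0 dp)
    _ 0 (N+1) (by omega)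
    (fun i dp hi0 hiN hdp => hinner i dp hi0 hiN hdp)
    _ (inv_init construction N M hN hM)
  rw [hmain.2.2 N M (by omega) (by omega) (by omega) (by omega), if_pos (by omega)]
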